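-- pv_equiv track=rewrite | github.com/finckenstein/KitchenToolsKB | utility/partition_tools.py | filter_out_duplicates
-- ===== SOURCE A (Python) =====
-- def filter_out_duplicates(tmp_utensil):
--     tmp = {}
--     for tup in tmp_utensil:
--         if tup[0] not in tmp:
--             tmp[tup[0]] = tup[1]
--         elif tmp[tup[0]] < tup[1]:
--             tmp[tup[0]] = tup[1]
--     return tmp
-- ===== SOURCE B (Python) =====
-- def filter_out_duplicates(tmp_utensil):
--     # Group-then-reduce: collect every value per key (first-seen key order),
--     # then take the max of each group in a second pass.
--     groups = {}
--     for key, value in tmp_utensil: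
--         groups.setdefault(key, []).append(value)
--     return {k: max(vs) for k, vs in groups.items()}
-- ===== Notes on version B (the rewrite author's own statement) =====
-- stated objective: alternative
-- what changed: A keeps a single running maximum per key updated in-stream with an if/elif; B first groups all values per key (setdefault/append) and then reduces each group with max in a separate dict-comprehension pass.
import Mathlib
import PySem

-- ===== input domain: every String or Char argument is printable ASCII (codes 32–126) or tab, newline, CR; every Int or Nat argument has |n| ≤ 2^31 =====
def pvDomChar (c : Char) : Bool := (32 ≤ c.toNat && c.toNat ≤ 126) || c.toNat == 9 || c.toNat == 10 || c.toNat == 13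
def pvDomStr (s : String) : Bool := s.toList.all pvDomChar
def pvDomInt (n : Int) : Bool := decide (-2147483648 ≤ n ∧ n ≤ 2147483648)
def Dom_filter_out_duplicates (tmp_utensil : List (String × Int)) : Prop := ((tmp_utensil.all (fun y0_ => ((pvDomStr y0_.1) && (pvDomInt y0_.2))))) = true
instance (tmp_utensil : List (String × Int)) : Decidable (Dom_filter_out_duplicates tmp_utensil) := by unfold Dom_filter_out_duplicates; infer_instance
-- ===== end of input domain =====

-- B replaces A's streaming if/elif running-maximum update with a group-then-reduce
-- decomposition (collect every value per key, then max each group); objective: alternative.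

-- ===== PORT A =====
-- literal port: tmp = {}; for tup: if tup[0] not in tmp → set; elif tmp[tup[0]] < tup[1] → set
def filter_out_duplicates (tmp_utensil : List (String × Int)) : List (String × Int) :=
  (tmp_utensil.foldl
    (fun tmp tup =>
      if tmp.contains tup.1 = false then tmp.insert tup.1 tup.2
      else if tmp.getD tup.1 0 < tup.2 then tmp.insert tup.1 tup.2
      else tmp)
    PySem.Dict.empty).items

-- ===== PORT B =====
-- port of Source B: groups.setdefault(key, []).append(value) is Dict.modify key [] (· ++ [value]);
-- max(vs) on the (always nonempty) group is (PySem.List.max? vs id).getD 0.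
def filter_out_duplicates_alt (tmp_utensil : List (String × Int)) : List (String × Int) :=
  let groups := tmp_utensil.foldl
    (fun g p => g.modify p.1 [] (fun vs => vs ++ [p.2])) PySem.Dict.empty
  groups.items.map (fun p => (p.1, (PySem.List.max? p.2 (fun y => y)).getD 0))

-- ===== PRECONDITION & SPEC =====
def Spec_filter_out_duplicates (tmp_utensil : List (String × Int)) (out : List (String × Int)) : Prop := out = filter_out_duplicates_alt tmp_utensil
instance (tmp_utensil : List (String × Int)) (out : List (String × Int)) : Decidable (Spec_filter_out_duplicates tmp_utensil out) := by unfold Spec_filter_out_duplicates; infer_instance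

-- ===== CLAIM (what is proved, stated in full; the proofs are below) =====
def Claim_equal_filter_out_duplicates : Prop := ∀ (tmp_utensil : List (String × Int)), Dom_filter_out_duplicates tmp_utensil → Spec_filter_out_duplicates tmp_utensil (filter_out_duplicates tmp_utensil)

-- ===== LEMMAS AND PROOFS =====

-- A's loop body, named for the lemmas below
def pvStepA (tmp : PySem.Dict String Int) (tup : String × Int) : PySem.Dict String Int :=
  if tmp.contains tup.1 = false then tmp.insert tup.1 tup.2
  else if tmp.getD tup.1 0 < tup.2 then tmp.insert tup.1 tup.2
  else tmp

-- the running-max step that both A's update rule and PySem.List.max? perform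
def pvMaxStep (acc : Option Int) (x : Int) : Option Int :=
  match acc with
  | none => some x
  | some m => if m < x then some x else some m

theorem pvMax?_eq_foldl (vs : List Int) :
    PySem.List.max? vs (fun y => y) = vs.foldl pvMaxStep none := by
  unfold PySem.List.max?
  congr 1
  funext acc x
  cases acc <;> rfl

theorem pvKeysA_step (d : PySem.Dict String Int) (p : String × Int) :
    (pvStepA d p).keys = if d.contains p.1 then d.keys else d.keys ++ [p.1] := by
  unfold pvStepA
  cases h : d.contains p.1 with
  | false =>
    rw [if_pos rfl, PySem.Dict.keys_insert_of_not_contains d p.2 h, if_neg (by simp)]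
  | true =>
    rw [if_neg (by simp)]
    split
    · rw [PySem.Dict.keys_insert_of_contains d p.2 h, if_pos rfl]
    · rw [if_pos rfl]

-- A's dict and B's grouping dict have the same keys in the same order
theorem pvKeys_par (l : List (String × Int)) (d1 : PySem.Dict String Int)
    (d2 : PySem.Dict String (List Int)) (h : d1.keys = d2.keys) :
    (l.foldl pvStepA d1).keys =
      (l.foldl (fun g p => g.modify p.1 [] (fun vs => vs ++ [p.2])) d2).keys := by
  induction l generalizing d1 d2 with
  | nil => simpa using h
  | cons p t ih =>
    simp only [List.foldl_cons]
    apply ih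
    have hc : d1.contains p.1 = d2.contains p.1 := by
      rw [PySem.Dict.contains_eq_decide_mem_keys, PySem.Dict.contains_eq_decide_mem_keys, h]
    rw [pvKeysA_step, PySem.Dict.keys_modify]
    cases h2 : d2.contains p.1 with
    | false =>
      rw [PySem.Dict.keys_insert_of_not_contains _ _ h2]
      simp [hc, h2, h]
    | true =>
      rw [PySem.Dict.keys_insert_of_contains _ _ h2]
      simp [hc, h2, h]

theorem pvStepA_get_self (d : PySem.Dict String Int) (p : String × Int) :
    (pvStepA d p).get? p.1 = pvMaxStep (d.get? p.1) p.2 := by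
  unfold pvStepA
  cases h : d.contains p.1 with
  | false =>
    have hn : d.get? p.1 = none := (PySem.Dict.get?_eq_none_iff_contains d p.1).mpr h
    rw [if_pos rfl, PySem.Dict.get?_insert, if_pos rfl, hn]
    rfl
  | true =>
    have hs : ∃ v, d.get? p.1 = some v := by
      cases hg : d.get? p.1 with
      | none => rw [(PySem.Dict.get?_eq_none_iff_contains d p.1).mp hg] at h; cases h
      | some v => exact ⟨v, rfl⟩
    obtain ⟨v, hv⟩ := hs
    have hgd : d.getD p.1 0 = v := by rw [PySem.Dict.getD_eq_get?_getD, hv]; rfl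
    rw [if_neg (by simp), hgd, hv]
    simp only [pvMaxStep]
    split
    · rw [PySem.Dict.get?_insert, if_pos rfl]
    · exact hv

theorem pvStepA_get_ne (d : PySem.Dict String Int) (p : String × Int) (k : String)
    (hk : k ≠ p.1) : (pvStepA d p).get? k = d.get? k := by
  unfold pvStepA
  split
  · rw [PySem.Dict.get?_insert, if_neg hk]
  · split
    · rw [PySem.Dict.get?_insert, if_neg hk]
    · rfl

-- A's loop computes, at each key, the running max of that key's values
theorem pvGetA (l : List (String × Int)) (d : PySem.Dict String Int) (k : String) :
    (l.foldl pvStepA d).get? k =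
      ((l.filter (fun p => p.1 == k)).map (fun x => x.2)).foldl pvMaxStep (d.get? k) := by
  induction l generalizing d with
  | nil => simp
  | cons p t ih =>
    simp only [List.foldl_cons, List.filter_cons]
    by_cases hk : p.1 = k
    · subst hk
      rw [ih, pvStepA_get_self]
      simp
    · have hbeq : (p.1 == k) = false := by simp [hk]
      rw [ih, pvStepA_get_ne d p k (fun e => hk e.symm)]
      simp [hbeq]

-- ===== VERDICT (by name: the statement is the Claim_ definition above) =====
theorem filter_out_duplicates_spec : Claim_equal_filter_out_duplicates := by
  intro l _
  unfold Spec_filter_out_duplicates filter_out_duplicates filter_out_duplicates_alt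
  show (l.foldl pvStepA PySem.Dict.empty).items = _
  set dA := l.foldl pvStepA PySem.Dict.empty with hdA
  set g := l.foldl (fun g p => g.modify p.1 [] (fun vs => vs ++ [p.2]))
      (PySem.Dict.empty : PySem.Dict String (List Int)) with hg
  have hkeys : dA.keys = g.keys := by
    apply pvKeys_par; simp [PySem.Dict.keys_empty]
  have hnodg : g.keys.Nodup := by
    apply PySem.Dict.nodup_keys_foldl_modify_key l (fun p => p.1) [] (fun _ p vs => vs ++ [p.2])
    simp [PySem.Dict.keys_empty]
  have hnodA : dA.keys.Nodup := hkeys ▸ hnodg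
  change dA.items = g.items.map (fun p => (p.1, (PySem.List.max? p.2 fun y => y).getD 0))
  rw [PySem.Dict.items_eq_map_keys dA hnodA 0, PySem.Dict.items_eq_map_keys g hnodg [],
      List.map_map, hkeys]
  apply List.map_congr_left
  intro k _
  simp only [Function.comp]
  have hA : dA.getD k 0 =
      (((l.filter (fun p => p.1 == k)).map (fun x => x.2)).foldl pvMaxStep none).getD 0 := by
    rw [PySem.Dict.getD_eq_get?_getD, hdA, pvGetA, PySem.Dict.get?_empty]
  have hB : g.getD k [] = (l.filter (fun p => p.1 == k)).map (fun x => x.2) := by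
    rw [hg, PySem.Dict.getD_foldl_modify_append, PySem.Dict.getD_empty]
    simp
  rw [hA, hB, pvMax?_eq_foldl]
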